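-- pv_equiv track=rewrite | github.com/bmahabirbu/EC602 | HW1/hw1_numbers.py | divisorsum
-- ===== SOURCE A (Python) =====
-- def divisorsum(x):
--     message = ""
--     div_counter = 0
--     for i in range(1,x+1):
--         if x % i == 0 and i != x:
--             message += str(i)+"+"
--             div_counter += i
--         if i == x:
--                 #remove last + sign
--                 message = message[:-1]
--                 message += " = "+str(div_counter)
--     return message
-- ===== SOURCE B (Python) =====
-- def divisorsum(x):
--     if x < 1:
--         return ""
--     divs = set()
--     d = 1
--     while d * d <= x:
--         if x % d == 0:
--             divs.add(d)
--             divs.add(x // d)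
--         d += 1
--     divs.discard(x)
--     divs = sorted(divs)
--     return "+".join(str(i) for i in divs) + " = " + str(sum(divs))
-- ===== Notes on version B (the rewrite author's own statement) =====
-- stated objective: faster
-- what changed: B enumerates divisor pairs (d, x//d) only up to sqrt(x) into a set, sorts them and builds the string with join, instead of A's scan of every i in 1..x with incremental string concatenation and in-loop finalization.
import Mathlib
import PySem

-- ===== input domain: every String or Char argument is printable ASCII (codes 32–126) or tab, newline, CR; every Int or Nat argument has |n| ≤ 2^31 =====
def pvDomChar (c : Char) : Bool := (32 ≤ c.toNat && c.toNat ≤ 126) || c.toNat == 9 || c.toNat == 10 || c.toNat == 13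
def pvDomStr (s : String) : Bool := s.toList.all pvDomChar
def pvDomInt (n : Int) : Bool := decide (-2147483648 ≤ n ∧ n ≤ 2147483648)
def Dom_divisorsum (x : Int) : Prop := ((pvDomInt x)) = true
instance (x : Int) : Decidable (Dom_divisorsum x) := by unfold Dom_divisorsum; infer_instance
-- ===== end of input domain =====

-- B replaces A's O(x) scan by an O(sqrt(x)) divisor-pair enumeration into a set, then sort + join.

-- ===== PORT A =====
-- literal port of A: fold over range(1, x+1), accumulating (message, div_counter);
-- message kept as List Char (PySem.Chars is the exact model of Python str).
def divisorsum (x : Int) : String :=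
  let st := (PySem.List.pyRange 1 (x + 1)).foldl
    (fun (mc : List Char × Int) i =>
      let mc1 := if PySem.Int.mod x i = 0 ∧ i ≠ x
                 then (mc.1 ++ PySem.Int.toChars i ++ ['+'], mc.2 + i) else mc
      if i = x then
        (PySem.Chars.slice mc1.1 none (some (-1)) ++ (' ' :: '=' :: ' ' :: PySem.Int.toChars mc1.2), mc1.2)
      else mc1)
    ([], 0)
  String.mk st.1

-- ===== PORT B =====
-- B's while loop: d from 1 while d*d <= x, adding d and x//d to the set when d divides x.
def pvCollect (x d : Int) (s : PySem.Set Int) : PySem.Set Int :=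
  if d * d ≤ x then
    pvCollect x (d + 1)
      (if PySem.Int.mod x d = 0 then
        PySem.Set.add (PySem.Set.add s d) (PySem.Int.floordiv x d) else s)
  else s
termination_by (x + 1 - d).toNat
decreasing_by
  rename_i h
  have hdx : d ≤ x := by nlinarith [sq_nonneg d, sq_nonneg (d - 1)]
  omega

def divisorsum_alt (x : Int) : String :=
  if x < 1 then "" else
    let divs := PySem.List.sorted (PySem.Set.discard (pvCollect x 1 PySem.Set.empty) x) (fun i => i)
    String.mk (PySem.Chars.join ['+'] (divs.map PySem.Int.toChars) ++
               (' ' :: '=' :: ' ' :: PySem.Int.toChars (divs.foldl (· + ·) 0)))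

-- ===== PRECONDITION & SPEC =====
def Spec_divisorsum (x : Int) (out : String) : Prop := out = divisorsum_alt x
instance (x : Int) (out : String) : Decidable (Spec_divisorsum x out) := by unfold Spec_divisorsum; infer_instance

-- ===== CLAIM (what is proved, stated in full; the proofs are below) =====
def Claim_equal_divisorsum : Prop := ∀ (x : Int), Dom_divisorsum x → Spec_divisorsum x (divisorsum x)

-- ===== LEMMAS AND PROOFS =====

-- the proper divisors of x in increasing order
def pvDivs (x : Int) : List Int :=
  (PySem.List.pyRange 1 x).filter (fun i => decide (PySem.Int.mod x i = 0))

theorem pv_mem_divs {x m : Int} : m ∈ pvDivs x ↔ 1 ≤ m ∧ m < x ∧ m ∣ x := by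
  simp [pvDivs, PySem.List.mem_pyRange_one, PySem.Int.mod_eq_zero_iff_dvd, and_assoc]

theorem pv_nodup_divs (x : Int) : (pvDivs x).Nodup :=
  (PySem.List.nodup_pyRange_one 1 x).filter _

theorem pv_pairwise_divs (x : Int) : (pvDivs x).Pairwise (· < ·) :=
  (PySem.List.pairwise_lt_pyRange_one 1 x).filter _

theorem pv_nodup_collect (x : Int) : ∀ (d : Int) (s : PySem.Set Int), s.Nodup → (pvCollect x d s).Nodup := by
  intro d s hs
  induction d, s using pvCollect.induct x with
  | case1 d s h ih =>
    rw [pvCollect, if_pos h]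
    apply ih
    split
    · exact PySem.Set.nodup_add _ _ (PySem.Set.nodup_add _ _ hs)
    · exact hs
  | case2 d s h => rwa [pvCollect, if_neg h]

theorem pv_mem_collect (x : Int) : ∀ (d : Int) (s : PySem.Set Int) (m : Int), 1 ≤ d →
    (m ∈ pvCollect x d s ↔
      m ∈ s ∨ ∃ k, d ≤ k ∧ k * k ≤ x ∧ PySem.Int.mod x k = 0 ∧ (m = k ∨ m = PySem.Int.floordiv x k)) := by
  intro d s m hd
  induction d, s using pvCollect.induct x with
  | case1 d s h ih =>
    simp only [dite_eq_ite] at ih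
    rw [pvCollect, if_pos h, ih (by omega)]
    constructor
    · rintro (hm | ⟨k, hk1, hk2, hk3, hk4⟩)
      · split at hm
        · rename_i hmod
          rw [PySem.Set.mem_add, PySem.Set.mem_add] at hm
          rcases hm with (hm | hm) | hm
          · exact Or.inl hm
          · exact Or.inr ⟨d, le_refl d, h, hmod, Or.inl hm⟩
          · exact Or.inr ⟨d, le_refl d, h, ‹_›, Or.inr hm⟩
        · exact Or.inl hm
      · exact Or.inr ⟨k, by omega, hk2, hk3, hk4⟩
    · rintro (hm | ⟨k, hk1, hk2, hk3, hk4⟩)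
      · left; split
        · rw [PySem.Set.mem_add, PySem.Set.mem_add]; exact Or.inl (Or.inl hm)
        · exact hm
      · by_cases hkd : k = d
        · subst hkd
          left
          rw [if_pos hk3, PySem.Set.mem_add, PySem.Set.mem_add]
          rcases hk4 with h4 | h4
          · exact Or.inl (Or.inr h4)
          · exact Or.inr h4
        · exact Or.inr ⟨k, by omega, hk2, hk3, hk4⟩
  | case2 d s h =>
    rw [pvCollect, if_neg h]
    constructor
    · exact Or.inl
    · rintro (hm | ⟨k, hk1, hk2, hk3, _⟩)
      · exact hm
      · exfalso; nlinarith

theorem pv_collect_char (x m : Int) (hx : 1 ≤ x) :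
    m ∈ pvCollect x 1 PySem.Set.empty ↔ 1 ≤ m ∧ m ≤ x ∧ m ∣ x := by
  rw [pv_mem_collect x 1 PySem.Set.empty m le_rfl]
  constructor
  · rintro (hm | ⟨k, hk1, hk2, hk3, hk4⟩)
    · cases hm
    · rw [PySem.Int.mod_eq_zero_iff_dvd] at hk3
      rcases hk4 with rfl | rfl
      · exact ⟨hk1, by nlinarith, hk3⟩
      · obtain ⟨c, hc⟩ := hk3
        rw [PySem.Int.floordiv_eq_ediv_of_pos (by omega), hc,
            Int.mul_ediv_cancel_left c (by omega)]
        refine ⟨by nlinarith, by nlinarith, Dvd.intro k (by linarith [hc])⟩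
  · rintro ⟨hm1, hm2, hm3⟩
    right
    by_cases hsq : m * m ≤ x
    · exact ⟨m, hm1, hsq, (PySem.Int.mod_eq_zero_iff_dvd x m).mpr hm3, Or.inl rfl⟩
    · obtain ⟨c, hc⟩ := hm3
      have hc1 : 1 ≤ c := by nlinarith
      have hcm : c ≤ m := by nlinarith
      refine ⟨c, hc1, by nlinarith, (PySem.Int.mod_eq_zero_iff_dvd x c).mpr ⟨m, by linarith [hc]⟩, Or.inr ?_⟩
      rw [PySem.Int.floordiv_eq_ediv_of_pos (by omega), hc, Int.mul_ediv_cancel m (by omega)]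

-- B's sorted set of proper divisors IS pvDivs x
theorem pv_sorted_eq (x : Int) (hx : 1 ≤ x) :
    PySem.List.sorted (PySem.Set.discard (pvCollect x 1 PySem.Set.empty) x) (fun i => i) = pvDivs x := by
  apply PySem.List.sorted_eq_of_perm_of_pairwise_lt
  · rw [List.perm_ext_iff_of_nodup (pv_nodup_divs x)
      (PySem.Set.nodup_discard _ _ (pv_nodup_collect x 1 PySem.Set.empty List.nodup_nil))]
    intro m
    rw [pv_mem_divs, PySem.Set.mem_discard, pv_collect_char x m hx]
    constructor
    · rintro ⟨h1, h2, h3⟩; exact ⟨⟨h1, by omega, h3⟩, by omega⟩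
    · rintro ⟨⟨h1, h2, h3⟩, h4⟩; exact ⟨h1, by omega, h3⟩
  · exact pv_pairwise_divs x

theorem pv_foldl_add (l : List Int) : ∀ (c : Int), l.foldl (· + ·) c = c + l.sum := by
  induction l with
  | nil => simp
  | cons a t ih => intro c; simp [List.foldl_cons, ih]; ring

theorem pv_join_plus (L : List Int) :
    (L.flatMap (fun i => PySem.Int.toChars i ++ ['+'])).dropLast
      = PySem.Chars.join ['+'] (L.map PySem.Int.toChars) := by
  induction L with
  | nil => simp [PySem.Chars.join_nil]
  | cons a t ih =>
    cases t with
    | nil => simp [PySem.Chars.join_singleton]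
    | cons b r =>
      rw [List.flatMap_cons, List.dropLast_append_of_ne_nil (by simp [List.flatMap_cons]), ih]
      simp [PySem.Chars.join_cons_cons]

-- A's fold over range(1, x): while every i is < x, both `i != x` and `i == x` are decided
theorem pv_foldA (x : Int) (l : List Int) (hl : ∀ i ∈ l, i < x) :
    ∀ (m : List Char) (c : Int),
    l.foldl
      (fun (mc : List Char × Int) i =>
        let mc1 := if PySem.Int.mod x i = 0 ∧ i ≠ x
                   then (mc.1 ++ PySem.Int.toChars i ++ ['+'], mc.2 + i) else mc
        if i = x then
          (PySem.Chars.slice mc1.1 none (some (-1)) ++ (' ' :: '=' :: ' ' :: PySem.Int.toChars mc1.2), mc1.2)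
        else mc1)
      (m, c)
    = (m ++ (l.filter (fun i => decide (PySem.Int.mod x i = 0))).flatMap
              (fun i => PySem.Int.toChars i ++ ['+']),
       c + (l.filter (fun i => decide (PySem.Int.mod x i = 0))).sum) := by
  induction l with
  | nil => simp
  | cons a t ih =>
    intro m c
    have ha : a < x := hl a (List.mem_cons_self)
    have hax : a ≠ x := by omega
    rw [List.foldl_cons]
    simp only [hax, ne_eq, not_false_eq_true, and_true, if_neg (show ¬ a = x from hax)]
    by_cases hmod : PySem.Int.mod x a = 0
    · rw [if_pos hmod, ih (fun i hi => hl i (List.mem_cons_of_mem a hi))]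
      simp [hmod, List.filter_cons]
      omega
    · rw [if_neg hmod, ih (fun i hi => hl i (List.mem_cons_of_mem a hi))]
      simp [hmod, List.filter_cons]

-- closed form of A for x ≥ 1
theorem pv_A_eq (x : Int) (hx : 1 ≤ x) :
    divisorsum x
      = String.mk (((pvDivs x).flatMap (fun i => PySem.Int.toChars i ++ ['+'])).dropLast ++
                   (' ' :: '=' :: ' ' :: PySem.Int.toChars (pvDivs x).sum)) := by
  unfold divisorsum
  rw [show x + 1 = x + 1 from rfl, PySem.List.pyRange_one_succ_right (by omega : (1:Int) ≤ x),
      List.foldl_append,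
      pv_foldA x (PySem.List.pyRange 1 x)
        (fun i hi => (PySem.List.mem_pyRange_one.mp hi).2) [] 0]
  simp only [List.foldl_cons, List.foldl_nil, List.nil_append, zero_add]
  simp [PySem.Chars.slice_eq_listSlice, PySem.List.slice_to_neg_one, pvDivs]

-- ===== VERDICT (by name: the statement is the Claim_ definition above) =====
theorem divisorsum_spec : Claim_equal_divisorsum := by
  intro x _
  unfold Spec_divisorsum
  by_cases hx : x < 1
  · unfold divisorsum divisorsum_alt
    rw [if_pos hx, PySem.List.pyRange_one_eq_nil (by omega)]
    rfl
  · push_neg at hx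
    rw [pv_A_eq x hx]
    simp only [divisorsum_alt]
    rw [if_neg (by omega), pv_sorted_eq x hx, pv_join_plus, pv_foldl_add]
    simp
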